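-- pv_equiv track=rewrite | github.com/JamesMCo/Advent-Of-Code | 2024/02/Part1.py | solve
-- ===== SOURCE A (Python) =====
-- def solve(puzzle_input: list[str]) -> int:
--     def is_safe(report: list[int]) -> bool:
--         # None if not yet determined
--         ascending: bool | None = None
--
--         for a, b in zip(report, report[1:]):
--             if ascending is None:
--                 ascending = a < b
--
--             if a == b:
--                 return False
--             elif ascending and a > b:
--                 return False
--             elif not ascending and a < b:
--                 return False
--             elif not (-3 <= b - a <= 3):
--                 return False
--
--         # If no delta between adjacent pairs of numbers
--         # fails any test, then the report is safe
--         return True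
--
--     return len(list(filter(is_safe, [[int(x) for x in line.split()] for line in puzzle_input])))
-- ===== SOURCE B (Python) =====
-- def solve(puzzle_input: list[str]) -> int:
--     def is_safe(report: list[int]) -> bool:
--         diffs = [b - a for a, b in zip(report, report[1:])]
--         return all(1 <= d <= 3 for d in diffs) or all(-3 <= d <= -1 for d in diffs)
--
--     return sum(1 for line in puzzle_input if is_safe([int(x) for x in line.split()]))
-- ===== Notes on version B (the rewrite author's own statement) =====
-- stated objective: simpler
-- what changed: is_safe derives the list of consecutive differences once and tests it against two uniform range predicates (all in 1..3 or all in -3..-1), replacing the stateful ascending flag and the four-branch cascade; the count is a sum over a generator instead of len(list(filter(...))).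
-- outside the precondition, e.g. on solve(['1 a 3']): A raises ValueError, B raises ValueError
import Mathlib
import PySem

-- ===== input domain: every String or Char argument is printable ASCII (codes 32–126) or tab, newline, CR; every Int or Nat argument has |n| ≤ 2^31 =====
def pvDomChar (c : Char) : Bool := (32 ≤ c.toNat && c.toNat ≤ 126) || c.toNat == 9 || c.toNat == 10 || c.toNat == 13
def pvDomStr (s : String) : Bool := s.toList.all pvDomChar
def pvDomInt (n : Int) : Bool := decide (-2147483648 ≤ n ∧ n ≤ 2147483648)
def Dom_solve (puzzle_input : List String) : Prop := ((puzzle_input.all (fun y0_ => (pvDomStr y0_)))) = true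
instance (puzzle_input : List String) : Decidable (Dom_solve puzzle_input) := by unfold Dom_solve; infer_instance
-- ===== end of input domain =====

-- B replaces A's stateful ascending flag and branch cascade in is_safe by deriving the
-- diff list once and testing two uniform range predicates; objective: simpler.
-- Pre_solve excludes inputs where int(x) raises ValueError (a non-integer token).

-- ===== PORT A =====
-- the loop body of A's is_safe: state is the 'ascending' flag (none = not yet determined)
def pvGoA (asc? : Option Bool) : List (Int × Int) → Bool
  | [] => true
  | (a, b) :: rest =>
    let asc := asc?.getD (decide (a < b))
    if a = b then false
    else if asc && decide (a > b) then false
    else if !asc && decide (a < b) then false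
    else if !(decide (-3 ≤ b - a ∧ b - a ≤ 3)) then false
    else pvGoA (some asc) rest

def pvIsSafeA (report : List Int) : Bool :=
  pvGoA none (report.zip (PySem.List.slice report (some 1) none))

-- [int(x) for x in line.split()]; getD 0 is unreachable under Pre_solve (int(x) raises outside it)
def pvParseA (line : String) : List Int :=
  (PySem.Str.split₀ line).map (fun x => (PySem.Int.ofStr? x).getD 0)

def solve (puzzle_input : List String) : Int :=
  ((puzzle_input.map pvParseA).filter pvIsSafeA).length

-- ===== PORT B =====
def pvIsSafeB (report : List Int) : Bool :=
  let diffs := (report.zip (PySem.List.slice report (some 1) none)).map (fun p => p.2 - p.1)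
  (diffs.all fun d => decide (1 ≤ d ∧ d ≤ 3)) || (diffs.all fun d => decide (-3 ≤ d ∧ d ≤ -1))

def pvParseB (line : String) : List Int :=
  (PySem.Str.split₀ line).map (fun x => (PySem.Int.ofStr? x).getD 0)

def solve_alt (puzzle_input : List String) : Int :=
  puzzle_input.foldl (fun acc line => if pvIsSafeB (pvParseB line) then acc + 1 else acc) 0

-- ===== PRECONDITION & SPEC =====
-- Pre_solve: every whitespace-separated token of every line parses as a Python int
-- (otherwise A raises ValueError in int(x)).
def Pre_solve (puzzle_input : List String) : Prop :=
  (puzzle_input.all (fun line =>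
    (PySem.Str.split₀ line).all (fun t => (PySem.Int.ofStr? t).isSome))) = true
instance (puzzle_input : List String) : Decidable (Pre_solve puzzle_input) := by
  unfold Pre_solve; infer_instance

def pvWitness_solve : List String := ["7 6 4 2 1", "1 2 7 8 9", "1 3 6 7 9"]

def Spec_solve (puzzle_input : List String) (out : Int) : Prop := out = solve_alt puzzle_input
instance (puzzle_input : List String) (out : Int) : Decidable (Spec_solve puzzle_input out) := by
  unfold Spec_solve; infer_instance

-- ===== CLAIM (what is proved, stated in full; the proofs are below) =====
def Claim_equal_solve : Prop := ∀ (puzzle_input : List String), Dom_solve puzzle_input → Pre_solve puzzle_input → Spec_solve puzzle_input (solve puzzle_input)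

-- ===== LEMMAS AND PROOFS =====

-- per-pair range predicates (used only by the proofs)
def pvCP (p : Int × Int) : Bool := decide (1 ≤ p.2 - p.1 ∧ p.2 - p.1 ≤ 3)
def pvCN (p : Int × Int) : Bool := decide (-3 ≤ p.2 - p.1 ∧ p.2 - p.1 ≤ -1)

-- with the flag fixed to ascending, A's loop is an 'all' of the positive range check
theorem pvGoA_some_true (ps : List (Int × Int)) :
    pvGoA (some true) ps = ps.all pvCP := by
  induction ps with
  | nil => rfl
  | cons p rest ih =>
    obtain ⟨a, b⟩ := p
    rw [pvGoA, List.all_cons]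
    simp only [Option.getD_some]
    rw [ih, show (true && decide (a > b)) = decide (a > b) by simp,
        show (!true && decide (a < b)) = false by simp, if_neg (by simp : ¬ (false = true))]
    by_cases h1 : a = b
    · rw [if_pos h1]
      have hc : pvCP (a, b) = false := decide_eq_false (by simp; omega)
      simp [hc]
    · rw [if_neg h1]
      by_cases hgt : a > b
      · rw [if_pos (by simp [hgt])]
        have hc : pvCP (a, b) = false := decide_eq_false (by simp; omega)
        simp [hc]
      · rw [if_neg (by simp [hgt])]
        by_cases h4 : -3 ≤ b - a ∧ b - a ≤ 3
        · rw [show (!decide (-3 ≤ b - a ∧ b - a ≤ 3)) = false by simp [h4],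
              if_neg (by simp : ¬ (false = true))]
          have hc : pvCP (a, b) = true := decide_eq_true (by simp; omega)
          simp [hc]
        · rw [show (!decide (-3 ≤ b - a ∧ b - a ≤ 3)) = true by simp; omega, if_pos rfl]
          have hc : pvCP (a, b) = false := decide_eq_false (by simp; omega)
          simp [hc]

-- with the flag fixed to descending, A's loop is an 'all' of the negative range check
theorem pvGoA_some_false (ps : List (Int × Int)) :
    pvGoA (some false) ps = ps.all pvCN := by
  induction ps with
  | nil => rfl
  | cons p rest ih =>
    obtain ⟨a, b⟩ := p
    rw [pvGoA, List.all_cons]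
    simp only [Option.getD_some]
    rw [ih, show (false && decide (a > b)) = false by simp,
        show (!false && decide (a < b)) = decide (a < b) by simp,
        if_neg (by simp : ¬ (false = true))]
    by_cases h1 : a = b
    · rw [if_pos h1]
      have hc : pvCN (a, b) = false := decide_eq_false (by simp; omega)
      simp [hc]
    · rw [if_neg h1]
      by_cases hlt : a < b
      · rw [if_pos (by simp [hlt])]
        have hc : pvCN (a, b) = false := decide_eq_false (by simp; omega)
        simp [hc]
      · rw [if_neg (by simp [hlt])]
        by_cases h4 : -3 ≤ b - a ∧ b - a ≤ 3
        · rw [show (!decide (-3 ≤ b - a ∧ b - a ≤ 3)) = false by simp [h4],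
              if_neg (by simp : ¬ (false = true))]
          have hc : pvCN (a, b) = true := decide_eq_true (by simp; omega)
          simp [hc]
        · rw [show (!decide (-3 ≤ b - a ∧ b - a ≤ 3)) = true by simp; omega, if_pos rfl]
          have hc : pvCN (a, b) = false := decide_eq_false (by simp; omega)
          simp [hc]

-- A's loop with the flag undetermined is exactly B's two-range test
theorem pvGoA_none (ps : List (Int × Int)) :
    pvGoA none ps = (ps.all pvCP || ps.all pvCN) := by
  cases ps with
  | nil => rfl
  | cons p rest =>
    obtain ⟨a, b⟩ := p
    rw [pvGoA, List.all_cons, List.all_cons]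
    by_cases hab : a < b
    · have hcn : pvCN (a, b) = false := decide_eq_false (by simp; omega)
      have h1 : ¬ (a = b) := by omega
      rw [if_neg h1, Option.getD_none, decide_eq_true hab]
      rw [show decide (a > b) = false from decide_eq_false (by omega)]
      by_cases h4 : -3 ≤ b - a ∧ b - a ≤ 3
      · have hcp : pvCP (a, b) = true := decide_eq_true (by simp; omega)
        rw [show (!decide (-3 ≤ b - a ∧ b - a ≤ 3)) = false by simp [h4]]
        simp [pvGoA_some_true, hcp, hcn]
      · have hcp : pvCP (a, b) = false := decide_eq_false (by simp; omega)
        rw [show (!decide (-3 ≤ b - a ∧ b - a ≤ 3)) = true by simp; omega]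
        simp [hcp, hcn]
    · have hcp : pvCP (a, b) = false := decide_eq_false (by simp; omega)
      rw [Option.getD_none, show decide (a < b) = false from decide_eq_false hab]
      by_cases h1 : a = b
      · rw [if_pos h1]
        have hcn : pvCN (a, b) = false := decide_eq_false (by simp; omega)
        simp [hcp, hcn]
      · rw [if_neg h1]
        by_cases h4 : -3 ≤ b - a ∧ b - a ≤ 3
        · have hcn : pvCN (a, b) = true := decide_eq_true (by simp; omega)
          rw [show (!decide (-3 ≤ b - a ∧ b - a ≤ 3)) = false by simp [h4]]
          simp [pvGoA_some_false, hcp, hcn]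
        · have hcn : pvCN (a, b) = false := decide_eq_false (by simp; omega)
          rw [show (!decide (-3 ≤ b - a ∧ b - a ≤ 3)) = true by simp; omega]
          simp [hcp, hcn]

theorem isSafeA_eq_isSafeB (report : List Int) : pvIsSafeA report = pvIsSafeB report := by
  unfold pvIsSafeA pvIsSafeB
  rw [pvGoA_none]
  simp only [List.all_map]
  rfl

-- ===== VERDICT (by name: the statement is the Claim_ definition above) =====
theorem solve_spec : Claim_equal_solve := by
  intro puzzle_input _ _
  unfold Spec_solve solve solve_alt
  rw [PySem.List.foldl_count_if]
  have hpp : pvParseB = pvParseA := rfl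
  rw [hpp]
  have : List.countP (fun line => pvIsSafeB (pvParseA line)) puzzle_input
      = List.countP pvIsSafeA (puzzle_input.map pvParseA) := by
    rw [List.countP_map]
    exact List.countP_congr (by intro x _; simp [Function.comp, isSafeA_eq_isSafeB])
  rw [this, List.countP_eq_length_filter]
  simp
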